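-- pv_equiv track=rewrite | github.com/qod3r/ml | lab3/py/5.py | check_vowels
-- ===== SOURCE A (Python) =====
-- def check_vowels(x):
--     vowels = ['a', 'e', 'i', 'o', 'u']
--     count = 0
--     for v in vowels:
--         if v in x:
--             count += 1
--     if count >= 3:
--         return True
--     return False
-- ===== SOURCE B (Python) =====
-- def check_vowels(x):
--     seen = set()
--     for c in x:
--         if c in 'aeiou':
--             seen.add(c)
--             if len(seen) >= 3:
--                 return True
--     return False
-- ===== Notes on version B (the rewrite author's own statement) =====
-- stated objective: alternative
-- what changed: Instead of looping over the five vowels and re-scanning x for each, B makes a single pass over x's characters accumulating the set of distinct vowels seen and returns True early as soon as three are collected.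
import Mathlib
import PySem

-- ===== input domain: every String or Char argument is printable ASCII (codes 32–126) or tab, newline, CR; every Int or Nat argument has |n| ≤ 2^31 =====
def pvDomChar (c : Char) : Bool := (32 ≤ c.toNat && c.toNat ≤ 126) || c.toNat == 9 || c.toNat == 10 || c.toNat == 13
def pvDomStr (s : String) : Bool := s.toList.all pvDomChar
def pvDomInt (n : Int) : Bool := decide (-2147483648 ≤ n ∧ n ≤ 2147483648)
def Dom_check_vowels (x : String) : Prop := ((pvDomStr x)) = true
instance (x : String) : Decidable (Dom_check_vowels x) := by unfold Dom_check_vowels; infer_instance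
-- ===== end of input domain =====

-- B replaces A's per-vowel rescan loop by a single pass over x's characters that accumulates
-- the set of vowels seen and returns True early once three are collected (alternative).


-- ===== PORT A =====
-- for v in vowels: if v in x: count += 1;  then count >= 3
def check_vowels (x : String) : Bool :=
  let vowels : List String := ["a", "e", "i", "o", "u"]
  let count : Int := vowels.foldl (fun count v => if PySem.Str.isIn v x then count + 1 else count) 0
  if count ≥ 3 then true else false

-- ===== PORT B =====
-- the loop body: for c in x: if c in 'aeiou': seen.add(c); if len(seen) >= 3: return True
-- ('c in "aeiou"' for a single character c is exactly membership in the characters of "aeiou")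
def cvAltLoop (seen : PySem.Set Char) : List Char → Bool
  | [] => false
  | c :: rest =>
    if c ∈ ("aeiou".toList) then
      let seen' := PySem.Set.add seen c
      if 3 ≤ (PySem.Set.len seen' : Int) then true else cvAltLoop seen' rest
    else cvAltLoop seen rest

def check_vowels_alt (x : String) : Bool :=
  cvAltLoop PySem.Set.empty x.toList

-- ===== PRECONDITION & SPEC =====
def Spec_check_vowels (x : String) (out : Bool) : Prop := out = check_vowels_alt x
instance (x : String) (out : Bool) : Decidable (Spec_check_vowels x out) := by unfold Spec_check_vowels; infer_instance

-- ===== CLAIM (what is proved, stated in full; the proofs are below) =====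
def Claim_equal_check_vowels : Prop := ∀ (x : String), Dom_check_vowels x → Spec_check_vowels x (check_vowels x)

-- ===== LEMMAS AND PROOFS =====

-- 'v in x' for a one-character v is exactly character membership.
theorem pv_isIn_single (c : Char) (x : String) :
    PySem.Str.isIn (String.ofList [c]) x = decide (c ∈ x.toList) := by
  by_cases hc : c ∈ x.toList
  · simp only [hc, decide_true]
    rw [PySem.Str.isIn_iff_infix, String.toList_ofList]
    simpa [List.singleton_infix_iff] using hc
  · simp only [hc, decide_false]
    rw [Bool.eq_false_iff]
    intro h
    rw [PySem.Str.isIn_iff_infix, String.toList_ofList, List.singleton_infix_iff] at h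
    exact hc h

-- filter-by-membership as a Finset intersection
theorem pv_filter_toFinset {α : Type} [DecidableEq α] (u v : List α) :
    (u.filter (fun a => decide (a ∈ v))).toFinset = u.toFinset ∩ v.toFinset := by
  ext a; simp

-- Invariant of B's loop: while fewer than 3 distinct vowels have been seen, the loop
-- decides whether the seen set together with the vowels remaining in l reaches size 3.
theorem pv_loop_eq (l : List Char) (seen : PySem.Set Char)
    (hn : seen.Nodup) (hlt : seen.toFinset.card < 3) :
    cvAltLoop seen l
      = decide (3 ≤ (seen.toFinset ∪ (l.filter (fun a => decide (a ∈ "aeiou".toList))).toFinset).card) := by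
  induction l generalizing seen with
  | nil =>
    simp only [cvAltLoop, List.filter_nil, List.toFinset_nil, Finset.union_empty]
    rw [eq_comm, decide_eq_false_iff_not]
    omega
  | cons c rest ih =>
    by_cases hv : c ∈ "aeiou".toList
    · have hadd : (PySem.Set.add seen c).toFinset = insert c seen.toFinset := by
        ext a
        simp [List.mem_toFinset, PySem.Set.mem_add, or_comm]
      have hlen : (PySem.Set.len (PySem.Set.add seen c) : Int)
          = ((PySem.Set.add seen c).toFinset.card : Int) := by
        unfold PySem.Set.len
        rw [List.toFinset_card_of_nodup (PySem.Set.nodup_add seen c hn)]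
      have hfc : (c :: rest).filter (fun a => decide (a ∈ "aeiou".toList))
          = c :: rest.filter (fun a => decide (a ∈ "aeiou".toList)) := by
        rw [List.filter_cons, if_pos (decide_eq_true hv)]
      by_cases hstop : 3 ≤ (PySem.Set.len (PySem.Set.add seen c) : Int)
      · have h3 : 3 ≤ (insert c seen.toFinset).card := by
          rw [hlen, hadd] at hstop; exact_mod_cast hstop
        have hsub : insert c seen.toFinset ⊆
            seen.toFinset ∪ ((c :: rest).filter (fun a => decide (a ∈ "aeiou".toList))).toFinset := by
          rw [hfc]
          intro a ha
          rcases Finset.mem_insert.mp ha with h | h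
          · subst h; simp
          · exact Finset.mem_union_left _ h
        have := Finset.card_le_card hsub
        simp only [cvAltLoop, hv, if_true, hstop, if_true]
        rw [eq_comm, decide_eq_true_eq]
        omega
      · have hlt' : (PySem.Set.add seen c).toFinset.card < 3 := by
          by_contra h
          exact hstop (by rw [hlen, hadd]; rw [hadd] at h; exact_mod_cast Nat.le_of_not_lt (by omega))
        simp only [cvAltLoop, hv, if_true, hstop, if_false]
        rw [ih _ (PySem.Set.nodup_add seen c hn) hlt', hfc]
        have hset : (PySem.Set.add seen c).toFinset
              ∪ (rest.filter (fun a => decide (a ∈ "aeiou".toList))).toFinset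
            = seen.toFinset
              ∪ (c :: rest.filter (fun a => decide (a ∈ "aeiou".toList))).toFinset := by
          rw [hadd]
          ext a
          simp only [Finset.mem_union, Finset.mem_insert, List.mem_toFinset, List.mem_cons]
          tauto
        rw [hset]
    · have hfc : (c :: rest).filter (fun a => decide (a ∈ "aeiou".toList))
          = rest.filter (fun a => decide (a ∈ "aeiou".toList)) := by
        rw [List.filter_cons, if_neg (by simp only [decide_eq_true_eq]; exact hv)]
      simp only [cvAltLoop, hv, if_false]
      rw [ih _ hn hlt, hfc]

-- ===== VERDICT (by name: the statement is the Claim_ definition above) =====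
theorem check_vowels_spec : Claim_equal_check_vowels := by
  intro x _
  unfold Spec_check_vowels check_vowels check_vowels_alt
  rw [pv_loop_eq _ _ (by simp [PySem.Set.empty]) (by simp [PySem.Set.empty])]
  have hcard : (x.toList.filter (fun a => decide (a ∈ "aeiou".toList))).toFinset
      = ((("aeiou".toList).filter (fun a => decide (a ∈ x.toList))).toFinset) := by
    rw [pv_filter_toFinset, pv_filter_toFinset, Finset.inter_comm]
  have hnd : (("aeiou".toList).filter (fun a => decide (a ∈ x.toList))).Nodup :=
    List.Nodup.filter _ (by decide)
  have hlen : (x.toList.filter (fun a => decide (a ∈ "aeiou".toList))).toFinset.card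
      = (("aeiou".toList).filter (fun a => decide (a ∈ x.toList))).length := by
    rw [hcard, List.toFinset_card_of_nodup hnd]
  have ha : PySem.Str.isIn "a" x = decide ('a' ∈ x.toList) := pv_isIn_single 'a' x
  have he : PySem.Str.isIn "e" x = decide ('e' ∈ x.toList) := pv_isIn_single 'e' x
  have hi : PySem.Str.isIn "i" x = decide ('i' ∈ x.toList) := pv_isIn_single 'i' x
  have ho : PySem.Str.isIn "o" x = decide ('o' ∈ x.toList) := pv_isIn_single 'o' x
  have hu : PySem.Str.isIn "u" x = decide ('u' ∈ x.toList) := pv_isIn_single 'u' x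
  simp only [PySem.Set.empty, List.toFinset_nil, Finset.empty_union]
  rw [show decide (3 ≤ (x.toList.filter (fun a => decide (a ∈ "aeiou".toList))).toFinset.card)
      = decide (3 ≤ (("aeiou".toList).filter (fun a => decide (a ∈ x.toList))).length) from
      decide_eq_decide.mpr (by rw [hlen])]
  have hV : ("aeiou".toList) = ['a','e','i','o','u'] := by decide
  rw [hV]
  simp only [List.foldl_cons, List.foldl_nil, List.filter_cons, List.filter_nil,
    ha, he, hi, ho, hu]
  generalize decide ('a' ∈ x.toList) = ba
  generalize decide ('e' ∈ x.toList) = be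
  generalize decide ('i' ∈ x.toList) = bi
  generalize decide ('o' ∈ x.toList) = bo
  generalize decide ('u' ∈ x.toList) = bu
  revert ba be bi bo bu
  decide
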